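-- pv_equiv track=rewrite | github.com/youyanggu/adulteration | parse.py | parse_subject
-- ===== SOURCE A (Python) =====
-- def parse_origin(origin):
--     origin = origin[1:]
--     if origin == []:
--         return ''
--     if len(origin) == 1:
--         if 'containing unauthorised' in origin[0]:
--             return origin[0].split(' containing ')[0]
--         return origin[0]
--     if len(origin) > 1:
--         if origin[0].islower() and origin[0][:3] != 'the':
--             return ' from '.join(origin[1:])
--         else:
--             return ' from '.join(origin)
--
-- def parse_product(product):
--     if len(product) == 0:
--         return ''
--     if len(product) == 1:
--         if 'placing on the market of' in product[0] or \
--             'carbon monoxide treatment' in product[0]: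
--             return product[0].split(' of ')[-1]
--         if 'adverse reaction caused by' in product[0]:
--             return product[0].split(' by ')[-1]
--         return product[0]
--     if len(product) == 2:
--         if 'insufficient labelling of food supplement' in product[1]:
--             return 'food supplement'
--         return product[1]
--     if len(product) > 2:
--         s = ' in '.join(product[1:])
--         return s.split(' manufactured in ')[0]
--
-- def parse_amount(amount):
--     if len(amount) <= 1:
--         return ''
--     if len(amount) >= 2:
--         # if more than 2 chemicals, just take first one for now
--         return amount[1].split(')')[0]
--
-- def parse_chemical(chemical):
--     phrases = ['unauthorised use of', 'too high content of', 'undeclared',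
--                'suffocation risk as a result of the consumption of',
--                'unauthorised substances', 'unauthorised substance',
--                'high content of', 'abnormal smell of', 'unauthorised',
--                'addition of', 'suspicion of', 'presence of']
--     chem = chemical
--     for sub in ['carbon monoxide treatment', 'adverse reaction', 'placing on the market']:
--         if sub in chem:
--             return ''
--     chem = chem.replace('colours', 'colour')
--     for p in phrases:
--         chem = chem.replace(p, '')
--     chem = ' '.join(chem.split())
--     if chem.startswith('and '):
--         chem = chem[4:]
--     if ' and ' in chem:
--         return chem.split(' and ')[0]
--     return chem
--
-- def parse_subject(sub):
--     chemical, amount, product, origin = [], [], [], []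
--     sub = [' '.join(i.split()) for i in sub]
--
--     # origin
--     split = [i.split(' from ') for i in sub]
--     for v in split:
--         origin.append(parse_origin(v))
--
--     # product
--     split = [i[0] for i in split]
--     split = [i.split(' in ') for i in split]
--     for v in split:
--         product.append(parse_product(v))
--
--     # amount
--     split = [i[0] for i in split]
--     split = [i.split(' (') for i in split]
--     for v in split:
--         amount.append(parse_amount(v))
--
--     # chemical
--     split = [i[0] for i in split]
--     for v in split:
--         chemical.append(parse_chemical(v))
--
--     assert(len(chemical)==len(amount)==len(product)==len(origin)==len(sub))
--     return chemical, amount, product, origin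
-- ===== SOURCE B (Python) =====
-- # B: no fragment lists. Each subject is parsed by *peeling* strings around the
-- # first occurrence of a delimiter (find + slicing) and recursing/looping on the
-- # remainder, instead of materializing split lists and dispatching on their
-- # lengths; records are handled row-wise and the rows transposed at the end.
--
-- def _peel(s, sep):
--     """(text before first sep, text after it), or (s, None) if sep absent."""
--     i = s.find(sep)
--     if i < 0:
--         return s, None
--     return s[:i], s[i + len(sep):]
--
--
-- def _after_last(s, sep):
--     """Text after the last non-overlapping occurrence of sep (s if absent)."""
--     while True:
--         _, tail = _peel(s, sep)
--         if tail is None: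
--             return s
--         s = tail
--
--
-- def _origin_of(s):
--     _, tail = _peel(s, ' from ')
--     if tail is None:
--         return ''
--     first, rest = _peel(tail, ' from ')
--     if rest is None:
--         if 'containing unauthorised' in tail:
--             return _peel(tail, ' containing ')[0]
--         return tail
--     if first.islower() and first[:3] != 'the':
--         return rest
--     return tail
--
--
-- def _product_of(s):
--     _, tail = _peel(s, ' in ')
--     if tail is None:
--         if 'placing on the market of' in s or 'carbon monoxide treatment' in s:
--             return _after_last(s, ' of ')
--         if 'adverse reaction caused by' in s:
--             return _after_last(s, ' by ')
--         return s
--     if _peel(tail, ' in ')[1] is None: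
--         if 'insufficient labelling of food supplement' in tail:
--             return 'food supplement'
--         return tail
--     return _peel(tail, ' manufactured in ')[0]
--
--
-- def _amount_of(s):
--     _, tail = _peel(s, ' (')
--     if tail is None:
--         return ''
--     second = _peel(tail, ' (')[0]
--     return _peel(second, ')')[0]
--
--
-- _PHRASES = ['unauthorised use of', 'too high content of', 'undeclared',
--             'suffocation risk as a result of the consumption of',
--             'unauthorised substances', 'unauthorised substance',
--             'high content of', 'abnormal smell of', 'unauthorised',
--             'addition of', 'suspicion of', 'presence of']
--
--
-- def _chemical_of(s):
--     for stop in ('carbon monoxide treatment', 'adverse reaction',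
--                  'placing on the market'):
--         if stop in s:
--             return ''
--     c = s.replace('colours', 'colour')
--     for p in _PHRASES:
--         c = c.replace(p, '')
--     c = ' '.join(c.split())
--     if c.startswith('and '):
--         c = c[4:]
--     head, tail = _peel(c, ' and ')
--     return c if tail is None else head
--
--
-- def _row(raw):
--     s = ' '.join(raw.split())
--     head_from = _peel(s, ' from ')[0]
--     head_in = _peel(head_from, ' in ')[0]
--     head_par = _peel(head_in, ' (')[0]
--     return (_chemical_of(head_par), _amount_of(head_in),
--             _product_of(head_from), _origin_of(s))
--
--
-- def parse_subject(sub):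
--     rows = [_row(s) for s in sub]
--     return ([r[0] for r in rows], [r[1] for r in rows],
--             [r[2] for r in rows], [r[3] for r in rows])
-- ===== Notes on version B (the rewrite author's own statement) =====
-- stated objective: alternative
-- what changed: A materializes full split-fragment lists in four staged column-wise passes and dispatches on their lengths; B never builds fragment lists: it parses each record row-wise by peeling strings around the first delimiter occurrence (find + slicing) with recursion/loops on the remainder, then transposes the rows.
import Mathlib
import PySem

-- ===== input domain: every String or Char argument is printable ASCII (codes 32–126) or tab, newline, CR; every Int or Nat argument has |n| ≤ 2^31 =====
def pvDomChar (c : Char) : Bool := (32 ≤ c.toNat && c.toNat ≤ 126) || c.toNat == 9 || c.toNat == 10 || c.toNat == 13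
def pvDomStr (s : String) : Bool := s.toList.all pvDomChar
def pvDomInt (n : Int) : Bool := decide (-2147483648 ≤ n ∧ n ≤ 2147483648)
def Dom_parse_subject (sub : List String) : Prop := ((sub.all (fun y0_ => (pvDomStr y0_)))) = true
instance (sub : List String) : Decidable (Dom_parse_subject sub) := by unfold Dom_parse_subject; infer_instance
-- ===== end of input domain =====

-- B parses each record by peeling strings around the first occurrence of a delimiter
-- (find + slicing, with recursion on the remainder) instead of A's staged column-wise
-- passes that materialize split-fragment lists and dispatch on their lengths
-- (objective: alternative decomposition, same asymptotic cost).

-- shared primitives PySem lacks (used by both ports):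
-- s.split(sep) with a NONEMPTY literal sep: split? is some there, so getD [] is exact
def pySplit (s sep : String) : List String := (PySem.Str.split? s sep).getD []
-- str.islower(): exact on ASCII, where the cased characters are exactly the letters:
-- true iff some lowercase letter occurs and no uppercase letter occurs
def pyStrIslower (s : String) : Bool :=
  s.toList.any PySem.Chars.islower && s.toList.all (fun c => !PySem.Chars.isupper c)

-- ===== PORT A =====
def parse_origin (origin0 : List String) : String :=
  let origin := origin0.drop 1                                   -- origin = origin[1:]
  if origin = [] then ""
  else if origin.length = 1 then
    (if PySem.Str.isIn "containing unauthorised" (origin.headD "") then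
       (pySplit (origin.headD "") " containing ").headD ""       -- split never returns []
     else origin.headD "")
  else  -- len(origin) > 1
    (if pyStrIslower (origin.headD "") && !(PySem.Str.slice (origin.headD "") none (some 3) == "the") then
       PySem.Str.join " from " (origin.drop 1)
     else PySem.Str.join " from " origin)

def parse_product (product : List String) : String :=
  if product.length = 0 then ""
  else if product.length = 1 then
    (if PySem.Str.isIn "placing on the market of" (product.headD "") ||
        PySem.Str.isIn "carbon monoxide treatment" (product.headD "") then
       (pySplit (product.headD "") " of ").getLastD ""           -- [-1]; split never returns []
     else if PySem.Str.isIn "adverse reaction caused by" (product.headD "") then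
       (pySplit (product.headD "") " by ").getLastD ""
     else product.headD "")
  else if product.length = 2 then
    (if PySem.Str.isIn "insufficient labelling of food supplement" ((product.drop 1).headD "") then
       "food supplement"
     else (product.drop 1).headD "")
  else
    let s := PySem.Str.join " in " (product.drop 1)
    (pySplit s " manufactured in ").headD ""

def parse_amount (amount : List String) : String :=
  if amount.length ≤ 1 then ""
  else (pySplit ((amount.drop 1).headD "") ")").headD ""

def parse_chemical (chemical : String) : String :=
  let phrases := ["unauthorised use of", "too high content of", "undeclared",
                  "suffocation risk as a result of the consumption of",
                  "unauthorised substances", "unauthorised substance",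
                  "high content of", "abnormal smell of", "unauthorised",
                  "addition of", "suspicion of", "presence of"]
  -- the early-return for-loop over the 3-element literal list, unrolled (exact)
  if PySem.Str.isIn "carbon monoxide treatment" chemical then ""
  else if PySem.Str.isIn "adverse reaction" chemical then ""
  else if PySem.Str.isIn "placing on the market" chemical then ""
  else
    let chem := PySem.Str.replace chemical "colours" "colour"
    let chem := phrases.foldl (fun c p => PySem.Str.replace c p "") chem
    let chem := PySem.Str.join " " (PySem.Str.split₀ chem)
    let chem := if PySem.Str.startswith chem "and " then PySem.Str.slice chem (some 4) none else chem
    if PySem.Str.isIn " and " chem then (pySplit chem " and ").headD "" else chem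

def parse_subject (sub : List String) : List String × List String × List String × List String :=
  let sub := sub.map (fun i => PySem.Str.join " " (PySem.Str.split₀ i))
  let split := sub.map (fun i => pySplit i " from ")
  let origin := split.foldl (fun acc v => acc ++ [parse_origin v]) []
  let split := split.map (fun i => i.headD "")               -- i[0]; split never returns []
  let split := split.map (fun i => pySplit i " in ")
  let product := split.foldl (fun acc v => acc ++ [parse_product v]) []
  let split := split.map (fun i => i.headD "")
  let split := split.map (fun i => pySplit i " (")
  let amount := split.foldl (fun acc v => acc ++ [parse_amount v]) []
  let split := split.map (fun i => i.headD "")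
  let chemical := split.foldl (fun acc v => acc ++ [parse_chemical v]) []
  -- the assert is always true (each list gets exactly one element per subject)
  (chemical, amount, product, origin)

-- ===== PORT B =====
-- (text before first sep, text after it), or (s, none) if sep absent
def pvPeel (s sep : String) : String × Option String :=
  let i := PySem.Str.find s sep
  if i < 0 then (s, none)
  else (PySem.Str.slice s none (some i),
        some (PySem.Str.slice s (some (i + PySem.Str.len sep)) none))

-- the while-loop of Source B's _after_last as the obvious recursion; the fuel argument
-- only makes it total (each step strictly shortens s for the nonempty seps used)
def pvAfterLastGo (sep : String) : Nat → String → String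
  | 0, s => s
  | fuel + 1, s =>
    let p := pvPeel s sep
    if p.2.isNone then s else pvAfterLastGo sep fuel (p.2.getD "")

-- text after the last non-overlapping occurrence of sep (s if absent)
def pvAfterLast (s sep : String) : String := pvAfterLastGo sep (s.toList.length + 1) s

def originOfB (s : String) : String :=
  let f := pvPeel s " from "
  if f.2.isNone then ""
  else
    let tail := f.2.getD ""
    let g := pvPeel tail " from "
    if g.2.isNone then
      if PySem.Str.isIn "containing unauthorised" tail then (pvPeel tail " containing ").1
      else tail
    else
      if pyStrIslower g.1 && !(PySem.Str.slice g.1 none (some 3) == "the") then g.2.getD ""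
      else tail

def productOfB (s : String) : String :=
  let f := pvPeel s " in "
  if f.2.isNone then
    (if PySem.Str.isIn "placing on the market of" s ||
        PySem.Str.isIn "carbon monoxide treatment" s then pvAfterLast s " of "
     else if PySem.Str.isIn "adverse reaction caused by" s then pvAfterLast s " by "
     else s)
  else
    let tail := f.2.getD ""
    if (pvPeel tail " in ").2.isNone then
      (if PySem.Str.isIn "insufficient labelling of food supplement" tail then "food supplement"
       else tail)
    else (pvPeel tail " manufactured in ").1

def amountOfB (s : String) : String :=
  let f := pvPeel s " ("
  if f.2.isNone then ""
  else (pvPeel (pvPeel (f.2.getD "") " (").1 ")").1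

def chemicalOfB (s : String) : String :=
  if PySem.Str.isIn "carbon monoxide treatment" s then ""
  else if PySem.Str.isIn "adverse reaction" s then ""
  else if PySem.Str.isIn "placing on the market" s then ""
  else
    let c := PySem.Str.replace s "colours" "colour"
    let c := ["unauthorised use of", "too high content of", "undeclared",
              "suffocation risk as a result of the consumption of",
              "unauthorised substances", "unauthorised substance",
              "high content of", "abnormal smell of", "unauthorised",
              "addition of", "suspicion of", "presence of"].foldl
               (fun c p => PySem.Str.replace c p "") c
    let c := PySem.Str.join " " (PySem.Str.split₀ c)
    let c := if PySem.Str.startswith c "and " then PySem.Str.slice c (some 4) none else c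
    let p := pvPeel c " and "
    if p.2.isNone then c else p.1

def rowB (raw : String) : String × String × String × String :=
  let s := PySem.Str.join " " (PySem.Str.split₀ raw)
  let headFrom := (pvPeel s " from ").1
  let headIn := (pvPeel headFrom " in ").1
  let headPar := (pvPeel headIn " (").1
  (chemicalOfB headPar, amountOfB headIn, productOfB headFrom, originOfB s)

def parse_subject_alt (sub : List String) : List String × List String × List String × List String :=
  let rows := sub.map rowB
  (rows.map (·.1), rows.map (·.2.1), rows.map (·.2.2.1), rows.map (·.2.2.2))

-- ===== PRECONDITION & SPEC =====
def Spec_parse_subject (sub : List String) (out : List String × List String × List String × List String) : Prop := out = parse_subject_alt sub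
instance (sub : List String) (out : List String × List String × List String × List String) : Decidable (Spec_parse_subject sub out) := by unfold Spec_parse_subject; infer_instance

-- ===== CLAIM (what is proved, stated in full; the proofs are below) =====
def Claim_equal_parse_subject : Prop := ∀ (sub : List String), Dom_parse_subject sub → Spec_parse_subject sub (parse_subject sub)

-- ===== LEMMAS AND PROOFS =====

-- Python split with a nonempty sep, characterized by the FIRST occurrence:
-- a cons-shaped recursion the proofs below induct on.
def mySplit (sep : List Char) (l : List Char) : List (List Char) :=
  if h : PySem.Chars.find l sep = -1 ∨ sep = [] then [l]
  else
    l.take (PySem.Chars.find l sep).toNat ::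
      mySplit sep (l.drop ((PySem.Chars.find l sep).toNat + sep.length))
termination_by l.length
decreasing_by
  push_neg at h
  have hinf : sep <:+: l := (PySem.Chars.find_ne_neg_one_iff l sep).mp h.1
  have hlen : sep.length ≤ l.length := hinf.length_le
  have hsep : 0 < sep.length := List.length_pos_iff.mpr h.2
  simp only [List.length_drop]
  omega

theorem mySplit_ne_nil (sep l : List Char) : mySplit sep l ≠ [] := by
  unfold mySplit
  split <;> simp

-- accumulator lemma
theorem go_acc (sep : List Char) :
    ∀ (fuel : Nat) (l cur : List Char) (acc : List (List Char)),
      PySem.Chars.splitOn.go sep fuel l cur acc =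
        acc.reverse ++ PySem.Chars.splitOn.go sep fuel l cur [] := by
  intro fuel
  induction fuel with
  | zero => intro l cur acc; rw [PySem.Chars.splitOn.go.eq_def, PySem.Chars.splitOn.go.eq_def]; simp
  | succ fuel ih =>
    intro l cur acc
    cases l with
    | nil => rw [PySem.Chars.splitOn.go.eq_def, PySem.Chars.splitOn.go.eq_def]; simp
    | cons c rest =>
      rw [PySem.Chars.splitOn.go.eq_def, PySem.Chars.splitOn.go.eq_def]
      simp only [Nat.add_comm _ 1]
      by_cases hp : sep.isPrefixOf (c :: rest) = true
      · simp only [hp, if_true]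
        rw [ih _ _ (cur.reverse :: acc), ih _ _ [cur.reverse]]
        simp
      · simp only [hp, if_false]
        exact ih _ _ acc

-- find on a cons cell
theorem findgo_shift (sub : List Char) (hs : sub ≠ []) :
    ∀ (l : List Char) (k : Nat),
      PySem.Chars.find.go sub l k =
        if PySem.Chars.find.go sub l 0 = -1 then -1 else k + PySem.Chars.find.go sub l 0 := by
  intro l
  induction l with
  | nil =>
    intro k
    rw [PySem.Chars.find.go.eq_def, PySem.Chars.find.go.eq_def]
    simp [List.isEmpty_iff, hs]
  | cons c rest ih =>
    intro k
    rw [PySem.Chars.find.go.eq_def]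
    conv_rhs => rw [PySem.Chars.find.go.eq_def]
    by_cases hp : sub.isPrefixOf (c :: rest) = true
    · simp [hp]
    · simp only [hp, if_false]
      rw [ih (k + 1), ih 1]
      have hge : -1 ≤ PySem.Chars.find.go sub rest 0 := PySem.Chars.neg_one_le_find rest sub
      split_ifs <;> push_cast <;> omega

theorem find_cons (sub : List Char) (hs : sub ≠ []) (c : Char) (rest : List Char) :
    PySem.Chars.find (c :: rest) sub =
      if sub.isPrefixOf (c :: rest) = true then 0
      else if PySem.Chars.find rest sub = -1 then -1 else 1 + PySem.Chars.find rest sub := by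
  show PySem.Chars.find.go sub (c :: rest) 0 = _
  rw [PySem.Chars.find.go.eq_def]
  by_cases hp : sub.isPrefixOf (c :: rest) = true
  · simp [hp]
  · simp only [hp, if_false]
    rw [findgo_shift sub hs rest 1]
    by_cases hr : PySem.Chars.find.go sub rest 0 = -1
    · rw [if_pos hr, if_pos (show PySem.Chars.find rest sub = -1 from hr)]
      simp
    · rw [if_neg hr, if_neg (show ¬PySem.Chars.find rest sub = -1 from hr)]
      have : PySem.Chars.find.go sub rest 0 = PySem.Chars.find rest sub := rfl
      rw [this]
      norm_num

-- splitOn IS mySplit (for nonempty sep)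
theorem find_nil_of_ne (sep : List Char) (hs : sep ≠ []) : PySem.Chars.find [] sep = -1 := by
  show PySem.Chars.find.go sep [] 0 = -1
  rw [PySem.Chars.find.go.eq_def]
  simp [List.isEmpty_iff, hs]

theorem go_eq_mySplit (sep : List Char) (hs : sep ≠ []) :
    ∀ (n : Nat) (l : List Char), l.length ≤ n →
      ∀ (fuel : Nat) (cur : List Char), l.length < fuel →
        PySem.Chars.splitOn.go sep fuel l cur [] =
          match mySplit sep l with
          | [] => []
          | p :: r => (cur.reverse ++ p) :: r := by
  intro n
  induction n with
  | zero =>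
    intro l hl fuel cur hfuel
    have hnil : l = [] := List.eq_nil_of_length_eq_zero (Nat.le_zero.mp hl)
    subst hnil
    cases fuel with
    | zero => omega
    | succ f =>
      rw [PySem.Chars.splitOn.go.eq_def, mySplit]
      simp [find_nil_of_ne sep hs]
  | succ n ih =>
    intro l hl fuel cur hfuel
    cases l with
    | nil =>
      cases fuel with
      | zero => omega
      | succ f =>
        rw [PySem.Chars.splitOn.go.eq_def, mySplit]
        simp [find_nil_of_ne sep hs]
    | cons c rest =>
      cases fuel with
      | zero => omega
      | succ f =>
        rw [PySem.Chars.splitOn.go.eq_def]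
        by_cases hp : sep.isPrefixOf (c :: rest) = true
        · have hsp : 0 < sep.length := List.length_pos_iff.mpr hs
          have hlenp : sep.length ≤ (c :: rest).length :=
            (List.isPrefixOf_iff_prefix.mp hp).length_le
          have hf0 : PySem.Chars.find (c :: rest) sep = 0 := by
            rw [find_cons sep hs]; simp [hp]
          simp only [hp, if_true]
          rw [go_acc]
          have hl' : rest.length + 1 ≤ n + 1 := by simpa using hl
          have hfuel' : rest.length + 1 < f + 1 := by simpa using hfuel
          have hsple : sep.length ≤ rest.length + 1 := by simpa using hlenp
          have hlenm : (List.drop sep.length (c :: rest)).length ≤ n := by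
            simp only [List.length_drop, List.length_cons]; omega
          have hlm : (List.drop sep.length (c :: rest)).length < f := by
            simp only [List.length_drop, List.length_cons]; omega
          have hrec := ih (List.drop sep.length (c :: rest)) hlenm f [] hlm
          rcases hms : mySplit sep (List.drop sep.length (c :: rest)) with _ | ⟨p, r⟩
          · exact absurd hms (mySplit_ne_nil sep _)
          · rw [hms] at hrec
            simp only [List.reverse_nil, List.nil_append] at hrec
            rw [hrec]
            have h2 : mySplit sep (c :: rest) =
                [] :: mySplit sep (List.drop sep.length (c :: rest)) := by
              rw [mySplit, dif_neg (by simp [hf0, hs]), hf0]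
              simp
            rw [h2, hms]
            simp
        · simp only [hp, if_false]
          have hrec := ih rest (by simp at hl; omega) f (c :: cur) (by simp at hfuel; omega)
          rw [hrec]
          have hfc := find_cons sep hs c rest
          rw [if_neg hp] at hfc
          by_cases hr : PySem.Chars.find rest sep = -1
          · have h1 : mySplit sep rest = [rest] := by rw [mySplit]; simp [hr]
            have h2 : mySplit sep (c :: rest) = [c :: rest] := by
              rw [mySplit]; simp [hfc, hr]
            rw [h1, h2]
            simp
          · have hge : -1 ≤ PySem.Chars.find rest sep := PySem.Chars.neg_one_le_find rest sep
            have hfc' : PySem.Chars.find (c :: rest) sep = 1 + PySem.Chars.find rest sep := by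
              rw [hfc, if_neg hr]
            have htoNat : (PySem.Chars.find (c :: rest) sep).toNat =
                (PySem.Chars.find rest sep).toNat + 1 := by omega
            have h1 : mySplit sep rest =
                rest.take (PySem.Chars.find rest sep).toNat ::
                  mySplit sep (rest.drop ((PySem.Chars.find rest sep).toNat + sep.length)) := by
              rw [mySplit, dif_neg (by simp [hr, hs])]
            have h2 : mySplit sep (c :: rest) =
                (c :: rest.take (PySem.Chars.find rest sep).toNat) ::
                  mySplit sep (rest.drop ((PySem.Chars.find rest sep).toNat + sep.length)) := by
              rw [mySplit, dif_neg (by simp [hfc', hs]; omega)]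
              rw [htoNat, List.take_succ_cons]
              have h3 : (PySem.Chars.find rest sep).toNat + 1 + sep.length =
                  ((PySem.Chars.find rest sep).toNat + sep.length) + 1 := by omega
              rw [h3, List.drop_succ_cons]
            rw [h1, h2]
            simp

theorem splitOn_eq_mySplit (sep : List Char) (hs : sep ≠ []) (l : List Char) :
    PySem.Chars.splitOn l sep = mySplit sep l := by
  show PySem.Chars.splitOn.go sep (l.length + 1) l [] [] = _
  rw [go_eq_mySplit sep hs l.length l (le_refl _) (l.length + 1) [] (Nat.lt_succ_self _)]
  rcases h : mySplit sep l with _ | ⟨p, r⟩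
  · exact absurd h (mySplit_ne_nil sep l)
  · simp

-- Python split reconstructs the string: sep.join(s.split(sep)) == s
theorem join_mySplit (sep : List Char) (hs : sep ≠ []) :
    ∀ (n : Nat) (l : List Char), l.length ≤ n →
      PySem.Chars.join sep (mySplit sep l) = l := by
  intro n
  induction n with
  | zero =>
    intro l hl
    have hnil : l = [] := List.eq_nil_of_length_eq_zero (Nat.le_zero.mp hl)
    subst hnil
    rw [mySplit]
    simp [find_nil_of_ne sep hs, PySem.Chars.join_singleton]
  | succ n ih =>
    intro l hl
    by_cases hf : PySem.Chars.find l sep = -1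
    · rw [mySplit]
      simp [hf, PySem.Chars.join_singleton]
    · have hge := PySem.Chars.neg_one_le_find l sep
      have hpos : 0 ≤ PySem.Chars.find l sep := by omega
      have hspec := PySem.Chars.find_spec (s := l) (sub := sep) hpos
      obtain ⟨u, hu⟩ := hspec.1
      have hdrop : l.drop ((PySem.Chars.find l sep).toNat + sep.length) = u := by
        have h1 : l.drop ((PySem.Chars.find l sep).toNat + sep.length) =
            (l.drop (PySem.Chars.find l sep).toNat).drop sep.length := by
          rw [List.drop_drop]
          try congr 1
          try omega
        rw [h1, ← hu]
        try rw [List.drop_left]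
        try simp
      have hinf : sep <:+: l := (PySem.Chars.find_ne_neg_one_iff l sep).mp hf
      have hsp : 0 < sep.length := List.length_pos_iff.mpr hs
      have hslen : sep.length ≤ l.length := hinf.length_le
      rw [mySplit, dif_neg (by simp [hf, hs])]
      rcases hms : mySplit sep (l.drop ((PySem.Chars.find l sep).toNat + sep.length)) with _ | ⟨p, r⟩
      · exact absurd hms (mySplit_ne_nil sep _)
      · have hrec := ih (l.drop ((PySem.Chars.find l sep).toNat + sep.length))
          (by simp only [List.length_drop]; omega)
        rw [hms] at hrec
        rw [PySem.Chars.join_cons_cons, hrec]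
        conv_rhs => rw [← List.take_append_drop (PySem.Chars.find l sep).toNat l]
        rw [← hu, hdrop]
        simp [List.append_assoc]


-- ===== String-level bridges =====
theorem str_toList_inj {s t : String} (h : s.toList = t.toList) : s = t := by
  rw [← String.ofList_toList (s := s), h, String.ofList_toList]

theorem peel_none (s sep : String) (hf : PySem.Chars.find s.toList sep.toList = -1) :
    pvPeel s sep = (s, none) := by
  unfold pvPeel
  simp only [PySem.Str.find, hf]
  norm_num

theorem peel_some (s sep : String) (hf : ¬ PySem.Chars.find s.toList sep.toList = -1) :
    pvPeel s sep =
      (String.ofList (s.toList.take (PySem.Chars.find s.toList sep.toList).toNat),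
       some (String.ofList (s.toList.drop
         ((PySem.Chars.find s.toList sep.toList).toNat + sep.toList.length)))) := by
  have hge := PySem.Chars.neg_one_le_find s.toList sep.toList
  have hpos : 0 ≤ PySem.Chars.find s.toList sep.toList := by omega
  unfold pvPeel
  simp only [PySem.Str.find, PySem.Str.len]
  rw [if_neg (by omega)]
  refine Prod.ext ?_ ?_
  · apply str_toList_inj
    rw [PySem.Str.toList_slice]
    simp [PySem.List.slice_to _ hpos]
  · simp only
    congr 1
    apply str_toList_inj
    rw [PySem.Str.toList_slice, PySem.Chars.slice_eq_listSlice]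
    have h0 : (0:Int) ≤ PySem.Chars.find s.toList sep.toList + ↑sep.toList.length := by omega
    rw [PySem.List.slice_from _ h0, String.toList_ofList]
    congr 1
    omega

theorem pySplit_eq (s sep : String) (hs : sep.toList ≠ []) :
    pySplit s sep = (mySplit sep.toList s.toList).map String.ofList := by
  unfold pySplit
  simp [PySem.Str.split?, PySem.Chars.split?, List.isEmpty_iff, hs,
        splitOn_eq_mySplit sep.toList hs]

theorem mySplit_cons (sep l : List Char) (hs : sep ≠ [])
    (hf : ¬ PySem.Chars.find l sep = -1) :
    mySplit sep l =
      l.take (PySem.Chars.find l sep).toNat ::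
        mySplit sep (l.drop ((PySem.Chars.find l sep).toNat + sep.length)) := by
  rw [mySplit, dif_neg (by simp [hf, hs])]

theorem mySplit_single (sep l : List Char) (hf : PySem.Chars.find l sep = -1) :
    mySplit sep l = [l] := by
  rw [mySplit]; simp [hf]

-- head of Python split = text before the first occurrence
theorem split_headD_eq_peel1 (s sep : String) (hs : sep.toList ≠ []) :
    (pySplit s sep).headD "" = (pvPeel s sep).1 := by
  rw [pySplit_eq s sep hs]
  by_cases hf : PySem.Chars.find s.toList sep.toList = -1
  · rw [mySplit_single _ _ hf, peel_none s sep hf]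
    simp [String.ofList_toList]
  · rw [mySplit_cons _ _ hs hf, peel_some s sep hf]
    simp

theorem map_ofList_getLastD (p : List Char) (l : List (List Char)) :
    ((p :: l).map String.ofList).getLastD "" = String.ofList ((p :: l).getLastD []) := by
  induction l generalizing p with
  | nil => simp
  | cons q r ih => simp only [List.map_cons, List.getLastD_cons] at *; exact ih q

theorem afterLastGo_eq (sep : String) (hs : sep.toList ≠ []) :
    ∀ (n : Nat) (s : String), s.toList.length ≤ n →
      ∀ (fuel : Nat), s.toList.length < fuel →
        pvAfterLastGo sep fuel s = String.ofList ((mySplit sep.toList s.toList).getLastD []) := by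
  intro n
  induction n with
  | zero =>
    intro s hl fuel hfuel
    cases fuel with
    | zero => omega
    | succ f =>
      have hnil : s.toList = [] := List.eq_nil_of_length_eq_zero (Nat.le_zero.mp hl)
      have hf : PySem.Chars.find s.toList sep.toList = -1 := by
        rw [hnil]; exact find_nil_of_ne sep.toList hs
      unfold pvAfterLastGo
      rw [peel_none s sep hf, mySplit_single _ _ hf]
      simp [String.ofList_toList]
  | succ n ih =>
    intro s hl fuel hfuel
    cases fuel with
    | zero => omega
    | succ f =>
      by_cases hf : PySem.Chars.find s.toList sep.toList = -1
      · unfold pvAfterLastGo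
        rw [peel_none s sep hf, mySplit_single _ _ hf]
        simp [String.ofList_toList]
      · have hge := PySem.Chars.neg_one_le_find s.toList sep.toList
        have hinf : sep.toList <:+: s.toList :=
          (PySem.Chars.find_ne_neg_one_iff s.toList sep.toList).mp hf
        have hsp : 0 < sep.toList.length := List.length_pos_iff.mpr hs
        have hslen : sep.toList.length ≤ s.toList.length := hinf.length_le
        unfold pvAfterLastGo
        rw [peel_some s sep hf]
        simp only [Option.isNone_some, Bool.false_eq_true, if_false, Option.getD_some]
        have htl : (String.ofList (s.toList.drop
            ((PySem.Chars.find s.toList sep.toList).toNat + sep.toList.length))).toList =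
            s.toList.drop ((PySem.Chars.find s.toList sep.toList).toNat + sep.toList.length) :=
          String.toList_ofList
        have hrec := ih (String.ofList (s.toList.drop
            ((PySem.Chars.find s.toList sep.toList).toNat + sep.toList.length)))
          (by rw [htl]; simp only [List.length_drop]; omega)
          f (by rw [htl]; simp only [List.length_drop]; omega)
        rw [hrec, htl]
        rw [mySplit_cons _ _ hs hf]
        rcases hms : mySplit sep.toList (s.toList.drop
            ((PySem.Chars.find s.toList sep.toList).toNat + sep.toList.length)) with _ | ⟨p, r⟩
        · exact absurd hms (mySplit_ne_nil sep.toList _)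
        · simp [List.getLastD_cons]

-- last element of Python split = text after the last (non-overlapping) occurrence
theorem split_getLastD_eq_afterLast (s sep : String) (hs : sep.toList ≠ []) :
    (pySplit s sep).getLastD "" = pvAfterLast s sep := by
  rw [pySplit_eq s sep hs]
  unfold pvAfterLast
  rw [afterLastGo_eq sep hs s.toList.length s (le_refl _) (s.toList.length + 1)
      (Nat.lt_succ_self _)]
  rcases hms : mySplit sep.toList s.toList with _ | ⟨p, r⟩
  · exact absurd hms (mySplit_ne_nil sep.toList _)
  · exact map_ofList_getLastD p r

-- sep.join of the split of l reconstructs l, at String level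
theorem join_split (sep : String) (l : List Char) (hs : sep.toList ≠ []) :
    PySem.Str.join sep ((mySplit sep.toList l).map String.ofList) = String.ofList l := by
  apply str_toList_inj
  rw [PySem.Str.toList_join, List.map_map]
  have hcomp : String.toList ∘ String.ofList = (id : List Char → List Char) :=
    funext (fun _ => String.toList_ofList)
  rw [hcomp, List.map_id]
  rw [join_mySplit sep.toList hs l.length l (le_refl _), String.toList_ofList]

-- ===== shape lemmas for A's per-field parsers =====
theorem parse_origin_one (a : String) : parse_origin [a] = "" := by
  unfold parse_origin; simp

theorem parse_origin_two (a b : String) :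
    parse_origin [a, b] =
      if PySem.Str.isIn "containing unauthorised" b then (pySplit b " containing ").headD ""
      else b := by
  unfold parse_origin; simp

theorem parse_origin_big (a b c : String) (r : List String) :
    parse_origin (a :: b :: c :: r) =
      if pyStrIslower b && !(PySem.Str.slice b none (some 3) == "the") then
        PySem.Str.join " from " (c :: r)
      else PySem.Str.join " from " (b :: c :: r) := by
  unfold parse_origin; simp

theorem parse_product_one (a : String) :
    parse_product [a] =
      if PySem.Str.isIn "placing on the market of" a ||
          PySem.Str.isIn "carbon monoxide treatment" a then (pySplit a " of ").getLastD ""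
      else if PySem.Str.isIn "adverse reaction caused by" a then (pySplit a " by ").getLastD ""
      else a := by
  unfold parse_product; simp

theorem parse_product_two (a b : String) :
    parse_product [a, b] =
      if PySem.Str.isIn "insufficient labelling of food supplement" b then "food supplement"
      else b := by
  unfold parse_product; simp

theorem parse_product_big (a b c : String) (r : List String) :
    parse_product (a :: b :: c :: r) =
      (pySplit (PySem.Str.join " in " (b :: c :: r)) " manufactured in ").headD "" := by
  unfold parse_product; simp

theorem parse_amount_one (a : String) : parse_amount [a] = "" := by
  unfold parse_amount; simp

theorem parse_amount_big (a b : String) (r : List String) :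
    parse_amount (a :: b :: r) = (pySplit b ")").headD "" := by
  unfold parse_amount
  rw [if_neg (by simp)]
  simp

-- ===== per-field equivalences =====
theorem originOfB_eq (s : String) : originOfB s = parse_origin (pySplit s " from ") := by
  have hP : (" from " : String).toList ≠ [] := by decide
  rw [pySplit_eq s " from " hP]
  unfold originOfB
  by_cases hf : PySem.Chars.find s.toList (" from " : String).toList = -1
  · rw [peel_none s " from " hf, mySplit_single _ _ hf]
    simp [parse_origin_one, String.ofList_toList]
  · rw [peel_some s " from " hf, mySplit_cons _ _ hP hf]
    simp only [Option.isNone_some, Bool.false_eq_true, if_false, Option.getD_some]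
    set tl := s.toList.drop
      ((PySem.Chars.find s.toList (" from " : String).toList).toNat +
        (" from " : String).toList.length) with htl
    have htls : (String.ofList tl).toList = tl := String.toList_ofList
    by_cases hft : PySem.Chars.find tl (" from " : String).toList = -1
    · rw [peel_none (String.ofList tl) " from " (by rw [htls]; exact hft),
          mySplit_single _ _ hft]
      simp only [List.map_cons, List.map_nil, Option.isNone_some, Option.isNone_none,
        Option.getD_some, Bool.false_eq_true, if_false, if_true, parse_origin_two]
      split_ifs with hc
      · exact (split_headD_eq_peel1 (String.ofList tl) " containing " (by decide)).symm
      · rfl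
    · rw [peel_some (String.ofList tl) " from " (by rw [htls]; exact hft)]
      rw [htls, mySplit_cons _ _ hP hft]
      rcases hms : mySplit (" from " : String).toList
          (tl.drop ((PySem.Chars.find tl (" from " : String).toList).toNat +
            (" from " : String).toList.length)) with _ | ⟨p, r⟩
      · exact absurd hms (mySplit_ne_nil _ _)
      · have hjoin1 : PySem.Str.join " from " (String.ofList p :: r.map String.ofList) =
            String.ofList (tl.drop ((PySem.Chars.find tl (" from " : String).toList).toNat +
              (" from " : String).toList.length)) := by
          have h := join_split " from "
            (tl.drop ((PySem.Chars.find tl (" from " : String).toList).toNat +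
              (" from " : String).toList.length)) hP
          rwa [hms, List.map_cons] at h
        have hjoin2 : PySem.Str.join " from "
            (String.ofList (tl.take (PySem.Chars.find tl (" from " : String).toList).toNat) ::
              String.ofList p :: r.map String.ofList) = String.ofList tl := by
          have h := join_split " from " tl hP
          rwa [mySplit_cons _ _ hP hft, hms, List.map_cons, List.map_cons] at h
        simp only [hms, List.map_cons, parse_origin_big, Option.isNone_some,
          Option.getD_some, Bool.false_eq_true, if_false]
        rw [hjoin1, hjoin2]

theorem productOfB_eq (s : String) : productOfB s = parse_product (pySplit s " in ") := by
  have hP : (" in " : String).toList ≠ [] := by decide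
  rw [pySplit_eq s " in " hP]
  unfold productOfB
  by_cases hf : PySem.Chars.find s.toList (" in " : String).toList = -1
  · rw [peel_none s " in " hf, mySplit_single _ _ hf]
    simp only [List.map_cons, List.map_nil, String.ofList_toList, Option.isNone_none,
      if_true, parse_product_one]
    split_ifs with h1 h2
    · exact (split_getLastD_eq_afterLast s " of " (by decide)).symm
    · exact (split_getLastD_eq_afterLast s " by " (by decide)).symm
    · rfl
  · rw [peel_some s " in " hf, mySplit_cons _ _ hP hf]
    simp only [Option.isNone_some, Bool.false_eq_true, if_false, Option.getD_some]
    set tl := s.toList.drop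
      ((PySem.Chars.find s.toList (" in " : String).toList).toNat +
        (" in " : String).toList.length) with htl
    have htls : (String.ofList tl).toList = tl := String.toList_ofList
    by_cases hft : PySem.Chars.find tl (" in " : String).toList = -1
    · rw [peel_none (String.ofList tl) " in " (by rw [htls]; exact hft),
          mySplit_single _ _ hft]
      simp only [List.map_cons, List.map_nil, Option.isNone_some, Option.isNone_none,
        Option.getD_some, Bool.false_eq_true, if_false, if_true, parse_product_two]
      try rfl
      try (split_ifs <;> rfl)
    · rw [peel_some (String.ofList tl) " in " (by rw [htls]; exact hft)]
      rw [htls, mySplit_cons _ _ hP hft]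
      rcases hms : mySplit (" in " : String).toList
          (tl.drop ((PySem.Chars.find tl (" in " : String).toList).toNat +
            (" in " : String).toList.length)) with _ | ⟨p, r⟩
      · exact absurd hms (mySplit_ne_nil _ _)
      · have hjoin2 : PySem.Str.join " in "
            (String.ofList (tl.take (PySem.Chars.find tl (" in " : String).toList).toNat) ::
              String.ofList p :: r.map String.ofList) = String.ofList tl := by
          have h := join_split " in " tl hP
          rwa [mySplit_cons _ _ hP hft, hms, List.map_cons, List.map_cons] at h
        simp only [hms, List.map_cons, parse_product_big, Option.isNone_some,
          Option.getD_some, Bool.false_eq_true, if_false]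
        rw [hjoin2]
        exact (split_headD_eq_peel1 (String.ofList tl) " manufactured in " (by decide)).symm

theorem amountOfB_eq (s : String) : amountOfB s = parse_amount (pySplit s " (") := by
  have hP : (" (" : String).toList ≠ [] := by decide
  rw [pySplit_eq s " (" hP]
  unfold amountOfB
  by_cases hf : PySem.Chars.find s.toList (" (" : String).toList = -1
  · rw [peel_none s " (" hf, mySplit_single _ _ hf]
    simp [parse_amount_one, String.ofList_toList]
  · rw [peel_some s " (" hf, mySplit_cons _ _ hP hf]
    simp only [Option.isNone_some, Bool.false_eq_true, if_false, Option.getD_some]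
    set tl := s.toList.drop
      ((PySem.Chars.find s.toList (" (" : String).toList).toNat +
        (" (" : String).toList.length) with htl
    have htls : (String.ofList tl).toList = tl := String.toList_ofList
    rcases hms : mySplit (" (" : String).toList tl with _ | ⟨p, r⟩
    · exact absurd hms (mySplit_ne_nil _ _)
    · have hfirst : (pvPeel (String.ofList tl) " (").1 = String.ofList p := by
        rw [← split_headD_eq_peel1 (String.ofList tl) " (" hP,
            pySplit_eq (String.ofList tl) " (" hP, htls, hms]
        simp
      simp only [hms, List.map_cons, parse_amount_big, Option.isNone_some,
        Option.getD_some, Bool.false_eq_true, if_false]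
      rw [hfirst]
      exact (split_headD_eq_peel1 (String.ofList p) ")" (by decide)).symm

theorem and_tail (y : String) :
    (if (pvPeel y " and ").2.isNone then y else (pvPeel y " and ").1) =
      if PySem.Str.isIn " and " y then (pySplit y " and ").headD "" else y := by
  have hP : (" and " : String).toList ≠ [] := by decide
  by_cases hf : PySem.Chars.find y.toList (" and " : String).toList = -1
  · have hin : PySem.Str.isIn " and " y = false := by
      simp only [PySem.Str.isIn_eq]
      exact (PySem.Chars.isIn_eq_false_iff _ _).mpr
        ((PySem.Chars.find_eq_neg_one_iff _ _).mp hf)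
    rw [peel_none y " and " hf, hin]
    simp
  · have hin : PySem.Str.isIn " and " y = true := by
      simp only [PySem.Str.isIn_eq]
      exact (PySem.Chars.isIn_iff_infix _ _).mpr
        ((PySem.Chars.find_ne_neg_one_iff _ _).mp hf)
    rw [split_headD_eq_peel1 y " and " hP, peel_some y " and " hf, hin]
    simp

theorem chemicalOfB_eq (s : String) : chemicalOfB s = parse_chemical s := by
  unfold chemicalOfB parse_chemical
  split_ifs with h1 h2 h3
  · rfl
  · rfl
  · rfl
  · simp only [and_tail]

-- loop-shape: appending one result per element IS map
theorem foldl_append_eq_map {α β : Type} (f : α → β) (l : List α) :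
    l.foldl (fun acc v => acc ++ [f v]) [] = l.map f := by
  have h : ∀ (acc : List β), l.foldl (fun acc v => acc ++ [f v]) acc = acc ++ l.map f := by
    induction l with
    | nil => intro acc; simp
    | cons x xs ih => intro acc; simp [ih]
  simpa using h []

-- ===== VERDICT (by name: the statement is the Claim_ definition above) =====
theorem parse_subject_spec : Claim_equal_parse_subject := by
  intro sub _
  show parse_subject sub = parse_subject_alt sub
  simp only [parse_subject, parse_subject_alt, foldl_append_eq_map, List.map_map]
  refine Prod.ext ?_ (Prod.ext ?_ (Prod.ext ?_ ?_))
  · apply List.map_congr_left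
    intro raw _
    simp only [Function.comp_apply, Function.comp_def, rowB]
    rw [← split_headD_eq_peel1 _ " from " (by decide),
        ← split_headD_eq_peel1 _ " in " (by decide),
        ← split_headD_eq_peel1 _ " (" (by decide),
        chemicalOfB_eq]
  · apply List.map_congr_left
    intro raw _
    simp only [Function.comp_apply, Function.comp_def, rowB]
    rw [amountOfB_eq, ← split_headD_eq_peel1 _ " from " (by decide),
        ← split_headD_eq_peel1 _ " in " (by decide)]
  · apply List.map_congr_left
    intro raw _
    simp only [Function.comp_apply, Function.comp_def, rowB]
    rw [productOfB_eq, ← split_headD_eq_peel1 _ " from " (by decide)]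
  · apply List.map_congr_left
    intro raw _
    simp only [Function.comp_apply, Function.comp_def, rowB]
    rw [originOfB_eq]
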